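-- pv_equiv track=rewrite | github.com/phgab/rendertest | weatherHourly.py | evalHourly
-- ===== SOURCE A (Python) =====
-- def evalHourly(hourly):
--     snow = hourly["snow"]
--     minStr = ""
--     if any([s != 0 for s in snow[0:2]]):
--         minStr = "Es wird voraussichtlich schneien."
--         hrlStr = "Schnee in den nächsten 2 h."
--     elif any([s != 0 for s in snow[0:4]]):
--         hrlStr = "Schnee in den nächsten 4 h."
--     elif any([s != 0 for s in snow[0:8]]):
--         hrlStr = "Schnee in den nächsten 8 h."
--     elif any([s != 0 for s in snow[0:24]]):
--         hrlStr = "Schnee in den nächsten 24 h."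
--     elif any([s != 0 for s in snow]):
--         hrlStr = "Schnee in den nächsten 48 h."
--     else:
--         hrlStr = ""
--     return [minStr, hrlStr]
-- ===== SOURCE B (Python) =====
-- def evalHourly(hourly):
--     snow = hourly["snow"]
--     i = next((k for k, s in enumerate(snow) if s != 0), None)
--     if i is None:
--         return ["", ""]
--     if i < 2:
--         return ["Es wird voraussichtlich schneien.", "Schnee in den nächsten 2 h."]
--     if i < 4:
--         return ["", "Schnee in den nächsten 4 h."]
--     if i < 8:
--         return ["", "Schnee in den nächsten 8 h."]
--     if i < 24:
--         return ["", "Schnee in den nächsten 24 h."]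
--     return ["", "Schnee in den nächsten 48 h."]
-- ===== Notes on version B (the rewrite author's own statement) =====
-- stated objective: simpler
-- what changed: Replaces five overlapping prefix scans (any over five slices) by a single scan computing the index of the first nonzero snow value, then one threshold comparison on that index.
import Mathlib
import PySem

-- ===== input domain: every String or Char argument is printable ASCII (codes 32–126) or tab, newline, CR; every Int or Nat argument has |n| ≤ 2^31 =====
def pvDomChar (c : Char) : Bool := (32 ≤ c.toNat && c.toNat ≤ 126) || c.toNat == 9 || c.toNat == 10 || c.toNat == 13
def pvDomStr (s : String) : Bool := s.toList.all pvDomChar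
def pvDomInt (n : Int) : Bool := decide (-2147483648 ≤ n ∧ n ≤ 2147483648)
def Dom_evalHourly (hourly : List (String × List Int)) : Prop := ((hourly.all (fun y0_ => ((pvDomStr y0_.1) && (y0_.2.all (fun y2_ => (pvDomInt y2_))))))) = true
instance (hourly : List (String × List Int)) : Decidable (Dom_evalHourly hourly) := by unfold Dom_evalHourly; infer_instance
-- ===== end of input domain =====

-- B replaces five overlapping prefix scans by one first-nonzero-index scan plus threshold comparisons (simpler).
-- On inputs without a "snow" key both Pythons raise KeyError; Pre_ excludes exactly those.


-- ===== PORT A =====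
-- hourly["snow"]: first match in the association list (KeyError = none, excluded by Pre_).
def evalHourly (hourly : List (String × List Int)) : List String :=
  match hourly.lookup "snow" with
  | none => []   -- Python raises KeyError here; excluded by Pre_evalHourly
  | some snow =>
    let minStr := ""
    if (PySem.List.slice snow (some 0) (some 2)).any (fun s => s != 0) then
      ["Es wird voraussichtlich schneien.", "Schnee in den nächsten 2 h."]
    else if (PySem.List.slice snow (some 0) (some 4)).any (fun s => s != 0) then
      [minStr, "Schnee in den nächsten 4 h."]
    else if (PySem.List.slice snow (some 0) (some 8)).any (fun s => s != 0) then
      [minStr, "Schnee in den nächsten 8 h."]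
    else if (PySem.List.slice snow (some 0) (some 24)).any (fun s => s != 0) then
      [minStr, "Schnee in den nächsten 24 h."]
    else if snow.any (fun s => s != 0) then
      [minStr, "Schnee in den nächsten 48 h."]
    else
      [minStr, ""]

-- ===== PORT B =====
def evalHourly_alt (hourly : List (String × List Int)) : List String :=
  match hourly.lookup "snow" with
  | none => []   -- Python raises KeyError here; excluded by Pre_evalHourly
  | some snow =>
    match snow.findIdx? (fun s => s != 0) with
    | none => ["", ""]
    | some i =>
      if i < 2 then ["Es wird voraussichtlich schneien.", "Schnee in den nächsten 2 h."]
      else if i < 4 then ["", "Schnee in den nächsten 4 h."]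
      else if i < 8 then ["", "Schnee in den nächsten 8 h."]
      else if i < 24 then ["", "Schnee in den nächsten 24 h."]
      else ["", "Schnee in den nächsten 48 h."]

-- ===== PRECONDITION & SPEC =====
-- A (and B) raise KeyError when "snow" is missing; Pre_ excludes exactly those inputs.
def Pre_evalHourly (hourly : List (String × List Int)) : Prop :=
  ("snow" ∈ hourly.map Prod.fst)
instance (hourly : List (String × List Int)) : Decidable (Pre_evalHourly hourly) := by unfold Pre_evalHourly; infer_instance
def pvWitness_evalHourly : (List (String × List Int)) := [("snow", [0, 3, 0])]
def Spec_evalHourly (hourly : List (String × List Int)) (out : List String) : Prop := out = evalHourly_alt hourly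
instance (hourly : List (String × List Int)) (out : List String) : Decidable (Spec_evalHourly hourly out) := by unfold Spec_evalHourly; infer_instance

-- ===== CLAIM (what is proved, stated in full; the proofs are below) =====
def Claim_equal_evalHourly : Prop := ∀ (hourly : List (String × List Int)), Dom_evalHourly hourly → Pre_evalHourly hourly → Spec_evalHourly hourly (evalHourly hourly)

-- ===== LEMMAS AND PROOFS =====

-- (take n xs).any p holds iff the first index where p holds exists and is < n
lemma any_take_iff (p : Int → Bool) (xs : List Int) (n : Nat) :
    ((xs.take n).any p = true) ↔ ∃ i, xs.findIdx? p = some i ∧ i < n := by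
  induction xs generalizing n with
  | nil => simp
  | cons x xs ih =>
    cases n with
    | zero => simp
    | succ m =>
      by_cases hx : p x = true
      · simp [List.findIdx?_cons, hx]
      · simp only [List.take_succ_cons, List.any_cons, hx, Bool.false_or,
          List.findIdx?_cons, ih]
        constructor
        · rintro ⟨i, hi, hlt⟩
          exact ⟨i + 1, by simp [hi], by omega⟩
        · rintro ⟨j, hj, hlt⟩
          rcases Option.map_eq_some_iff.mp hj with ⟨i, hi, rfl⟩
          exact ⟨i, hi, by omega⟩

lemma any_iff (p : Int → Bool) (xs : List Int) :
    (xs.any p = true) ↔ ∃ i, xs.findIdx? p = some i := by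
  induction xs with
  | nil => simp
  | cons x xs ih =>
    by_cases hx : p x = true
    · simp [List.findIdx?_cons, hx]
    · simp only [List.any_cons, hx, Bool.false_or, List.findIdx?_cons, ih]
      constructor
      · rintro ⟨i, hi⟩
        exact ⟨i + 1, by simp [hi]⟩
      · rintro ⟨j, hj⟩
        rcases Option.map_eq_some_iff.mp hj with ⟨i, hi, rfl⟩
        exact ⟨i, hi⟩

-- ===== VERDICT (by name: the statement is the Claim_ definition above) =====
theorem evalHourly_spec : Claim_equal_evalHourly := by
  intro hourly _ hpre
  unfold Spec_evalHourly evalHourly evalHourly_alt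
  cases hlk : hourly.lookup "snow" with
  | none =>
    -- impossible under Pre_: the "snow" key is present, so lookup cannot be none
    exfalso
    rw [List.lookup_eq_none_iff] at hlk
    rcases List.mem_map.mp hpre with ⟨⟨k, v⟩, hmem, hk⟩
    have := hlk (k, v) hmem
    simp_all
  | some snow =>
    have h2 : PySem.List.slice snow (some 0) (some 2) = snow.take 2 := by simp [pysem]
    have h4 : PySem.List.slice snow (some 0) (some 4) = snow.take 4 := by simp [pysem]
    have h8 : PySem.List.slice snow (some 0) (some 8) = snow.take 8 := by simp [pysem]
    have h24 : PySem.List.slice snow (some 0) (some 24) = snow.take 24 := by simp [pysem]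
    cases hf : snow.findIdx? (fun s => s != 0) with
    | none =>
      have hfa : ∀ n, (snow.take n).any (fun s => s != 0) = false := by
        intro n
        rw [← Bool.not_eq_true, any_take_iff]
        rintro ⟨i, hi, -⟩
        rw [hf] at hi
        simp at hi
      have hall : snow.any (fun s => s != 0) = false := by
        rw [← Bool.not_eq_true, any_iff]
        rintro ⟨i, hi⟩
        rw [hf] at hi
        simp at hi
      simp [h2, h4, h8, h24, hfa, hall, hf]
    | some i =>
      have key : ∀ n, (snow.take n).any (fun s => s != 0) = decide (i < n) := by
        intro n
        by_cases h : i < n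
        · simp only [h, decide_true]
          exact (any_take_iff _ snow n).mpr ⟨i, hf, h⟩
        · simp only [h, decide_false]
          rw [← Bool.not_eq_true, any_take_iff]
          rintro ⟨j, hj, hlt⟩
          rw [hf] at hj
          cases hj
          omega
      have hall : snow.any (fun s => s != 0) = true := (any_iff _ snow).mpr ⟨i, hf⟩
      simp only [h2, h4, h8, h24, key, hall, hf]
      split_ifs with a b c d <;>
        first
          | rfl
          | (simp only [decide_eq_true_eq] at a b c d ⊢ <;> omega)
          | (simp only [decide_eq_true_eq] at *; omega)
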